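-- pv_equiv track=rewrite | github.com/ayaanhossain/nrpcalc | nrpcalc/base/makerchecks.py | is_structure_not_conflict
-- ===== SOURCE A (Python) =====
-- def get_computable_form(struct):
--     '''
--     Get computable components from an RNA secondary structure.
--     '''
--     opened  = []
--     closed  = []
--     pairs   = []
--     invalid = []
--     for pos in range(len(struct)):
--         pairing = struct[pos]
--         if pairing == '(':
--             opened.append(pos)
--         elif pairing == ')':
--             closed.append(pos)
--             try:
--                 pairs.append((opened.pop(), closed.pop()))
--             except:
--                 pass
--         elif pairing not in ['x', '.']:
--             invalid.append(pos)
--     return pairs, opened, closed, invalid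
--
-- def is_contiguous(item1, item2):
--     '''
--     Check if two pairs are contiguous.
--     '''
--     if (item1[0]-item2[0] <= 1) and (item2[1]-item1[1] <= 1):
--         return True
--     return False
--
-- def is_structure_not_conflict(struct, homology):
--     '''
--     Q. Does the structure not enforce internal repeats?
--     A. Stack evalation of stack of pairs.
--     On failure returns (False, a list of locations with stems >= homology)
--     '''
--     pairs, opened, closed, invalid = get_computable_form(struct)
--     if pairs:
--         bad_contigs = []
--         stretch     = 1
--         pairs       = pairs[::-1]
--         start       = pairs.pop()
--         end         = None
--         item1       = start
--         item2       = end
--         while pairs: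
--             end   = pairs.pop()
--             item2 = end
--             if is_contiguous(item1, item2):
--                 item1 = item2
--                 item2 = None
--                 stretch += 1
--             else:
--                 if stretch >= homology:
--                     bad_contigs.append(((item1[0], start[0]), (start[1], item1[1])))
--                 stretch = 1
--                 start = item2
--                 item1 = start
--         if stretch >= homology:
--             bad_contigs.append(((end[0], start[0]), (start[1], end[1])))
--         if bad_contigs:
--             return (False, bad_contigs)
--     return (True, None)
-- ===== SOURCE B (Python) =====
-- def is_structure_not_conflict(struct, homology):
--     '''
--     Q. Does the structure not enforce internal repeats?
--     A. Single fused pass: stems are detected online while matching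
--        parentheses; no intermediate pair list, no second loop.
--     run is (first_pair, last_pair, length) of the stem being grown.
--     '''
--     stack = []
--     run = None
--     bad = []
--     for pos, ch in enumerate(struct):
--         if ch == '(':
--             stack.append(pos)
--         elif ch == ')' and stack:
--             p = (stack.pop(), pos)
--             if run is not None:
--                 f, l, n = run
--                 if p[0] >= l[0] - 1 and p[1] <= l[1] + 1:
--                     run = (f, p, n + 1)
--                     continue
--                 if n >= homology:
--                     bad.append(((l[0], f[0]), (f[1], l[1])))
--             run = (p, p, 1)
--     if run is None:
--         return (True, None)
--     f, l, n = run
--     if n >= homology: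
--         bad.append(((l[0], f[0]), (f[1], l[1])))
--     return (False, bad) if bad else (True, None)
-- ===== Notes on version B (the rewrite author's own statement) =====
-- stated objective: simpler
-- what changed: A's two-stage design (a four-list helper that materializes the full matched-pair list, then a separate while-loop with scalar run state popping a reversed copy) is fused into ONE streaming pass: stems are detected online at the moment each ')' is matched, so no pair list, no reversal and no second loop exist at all.
import Mathlib
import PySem

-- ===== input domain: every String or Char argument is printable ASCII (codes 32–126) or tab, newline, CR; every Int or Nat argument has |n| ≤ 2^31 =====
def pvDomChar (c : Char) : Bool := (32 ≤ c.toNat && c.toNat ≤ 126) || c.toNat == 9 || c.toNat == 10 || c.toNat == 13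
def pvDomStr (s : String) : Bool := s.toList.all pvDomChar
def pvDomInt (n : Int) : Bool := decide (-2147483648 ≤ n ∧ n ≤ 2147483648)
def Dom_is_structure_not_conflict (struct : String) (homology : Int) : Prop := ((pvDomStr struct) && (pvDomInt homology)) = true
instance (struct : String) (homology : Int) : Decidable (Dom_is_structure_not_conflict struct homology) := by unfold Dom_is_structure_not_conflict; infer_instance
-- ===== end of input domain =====

set_option maxRecDepth 4096


-- B fuses A's two stages (build the full matched-pair list, then a while-loop over a reversed
-- copy) into one streaming pass that detects stems as each ')' is matched; objective: simpler.

-- ===== PORT A =====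
-- 'for pos in range(len(struct)): pairing = struct[pos]' iterates exactly the (index, char)
-- pairs of the string, ported as recursion over PySem.List.enumerate struct.toList.
-- 'opened' is a Python stack (append/pop at the end), ported head-first; 'closed' and
-- 'pairs'/'invalid' are appended at the end, kept in Python order ('closed.pop()' pops the
-- element just appended, ported with dropLast).
def gcfLoop : List (Int × Char) → List Int → List Int → List (Int × Int) → List Int →
    (List (Int × Int) × List Int × List Int × List Int)
  | [], opened, closed, pairs, invalid => (pairs, opened.reverse, closed, invalid)
  | (pos, c) :: rest, opened, closed, pairs, invalid =>
    if c = '(' then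
      gcfLoop rest (pos :: opened) closed pairs invalid
    else if c = ')' then
      let closed1 := closed ++ [pos]
      match opened with
      | o :: os => gcfLoop rest os closed1.dropLast (pairs ++ [(o, closed1.getLast (by simp [closed1])) ]) invalid
      | [] => gcfLoop rest opened closed1 pairs invalid   -- opened.pop() raised; except: pass
    else if c = 'x' ∨ c = '.' then
      gcfLoop rest opened closed pairs invalid
    else
      gcfLoop rest opened closed pairs (invalid ++ [pos])

def get_computable_form (struct : String) : List (Int × Int) × List Int × List Int × List Int :=
  gcfLoop (PySem.List.enumerate struct.toList) [] [] [] []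

def is_contiguous (item1 item2 : Int × Int) : Bool :=
  if item1.1 - item2.1 ≤ 1 ∧ item2.2 - item1.2 ≤ 1 then true else false

-- 'pairs = pairs[::-1]' then 'pairs.pop()' pops from the end of the reversed list, i.e. takes
-- the pairs in their original order: ported as structural recursion on the original list.
-- endv is A's 'end' variable (None before the first loop iteration); where A would raise a
-- TypeError (end is None at the final append) the port skips the append — those inputs are
-- excluded by Pre_.
def aLoop (homology : Int) (bad : List ((Int × Int) × (Int × Int))) (stretch : Int)
    (start item1 : Int × Int) (endv : Option (Int × Int)) :
    List (Int × Int) → List ((Int × Int) × (Int × Int))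
  | [] =>
    if stretch ≥ homology then
      match endv with
      | some e => bad ++ [((e.1, start.1), (start.2, e.2))]
      | none => bad    -- A raises here (excluded by Pre_)
    else bad
  | p :: ps =>
    if is_contiguous item1 p then
      aLoop homology bad (stretch + 1) start p (some p) ps
    else
      let bad' := if stretch ≥ homology then bad ++ [((item1.1, start.1), (start.2, item1.2))] else bad
      aLoop homology bad' 1 p p (some p) ps

def is_structure_not_conflict (struct : String) (homology : Int) :
    Bool × (Option (List ((Int × Int) × (Int × Int)))) :=
  match (get_computable_form struct).1 with
  | [] => (true, none)
  | start :: rest =>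
    let bad_contigs := aLoop homology [] 1 start start none rest
    if bad_contigs ≠ [] then (false, some bad_contigs) else (true, none)

-- ===== PORT B =====
-- one streaming pass; state = stack of open positions, current run (first, last, length) or
-- none, and the bad list; a pair is formed and folded into the run the moment ')' is matched
def bLoop (homology : Int) : List (Int × Char) → List Int →
    Option ((Int × Int) × (Int × Int) × Int) → List ((Int × Int) × (Int × Int)) →
    Bool × (Option (List ((Int × Int) × (Int × Int))))
  | [], _, run, bad =>
    match run with
    | none => (true, none)
    | some (f, l, n) =>
      let bad' := if n ≥ homology then bad ++ [((l.1, f.1), (f.2, l.2))] else bad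
      if bad' = [] then (true, none) else (false, some bad')
  | (pos, c) :: rest, stack, run, bad =>
    if c = '(' then bLoop homology rest (pos :: stack) run bad
    else if c = ')' then
      match stack with
      | [] => bLoop homology rest [] run bad
      | s :: ss =>
        let p : Int × Int := (s, pos)
        match run with
        | none => bLoop homology rest ss (some (p, p, 1)) bad
        | some (f, l, n) =>
          if p.1 ≥ l.1 - 1 ∧ p.2 ≤ l.2 + 1 then
            bLoop homology rest ss (some (f, p, n + 1)) bad
          else
            bLoop homology rest ss (some (p, p, 1))
              (if n ≥ homology then bad ++ [((l.1, f.1), (f.2, l.2))] else bad)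
    else bLoop homology rest stack run bad

def is_structure_not_conflict_alt (struct : String) (homology : Int) :
    Bool × (Option (List ((Int × Int) × (Int × Int)))) :=
  bLoop homology (PySem.List.enumerate struct.toList) [] none []

-- ===== PRECONDITION & SPEC =====
-- number of matched '('/')' pairs in the structure (stack-depth count)
def pvMatchedPairs : List Char → Nat → Nat
  | [], _ => 0
  | c :: cs, depth =>
    if c = '(' then pvMatchedPairs cs (depth + 1)
    else if c = ')' then
      match depth with
      | d + 1 => pvMatchedPairs cs d + 1
      | 0 => pvMatchedPairs cs 0
    else pvMatchedPairs cs depth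

-- Pre_ excludes exactly the inputs where A raises a TypeError: exactly one matched pair and
-- homology ≤ 1 (A's final append then subscripts end = None).
def Pre_is_structure_not_conflict (struct : String) (homology : Int) : Prop :=
  ¬ (pvMatchedPairs struct.toList 0 = 1 ∧ homology ≤ 1)
instance (struct : String) (homology : Int) : Decidable (Pre_is_structure_not_conflict struct homology) := by
  unfold Pre_is_structure_not_conflict; infer_instance

def pvWitness_is_structure_not_conflict : String × Int := ("((..))x.", 2)

def Spec_is_structure_not_conflict (struct : String) (homology : Int) (out : Bool × (Option (List ((Int × Int) × (Int × Int))))) : Prop := out = is_structure_not_conflict_alt struct homology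
instance (struct : String) (homology : Int) (out : Bool × (Option (List ((Int × Int) × (Int × Int))))) : Decidable (Spec_is_structure_not_conflict struct homology out) := by unfold Spec_is_structure_not_conflict; infer_instance

-- ===== CLAIM (what is proved, stated in full; the proofs are below) =====
def Claim_equal_is_structure_not_conflict : Prop := ∀ (struct : String) (homology : Int), Dom_is_structure_not_conflict struct homology → Pre_is_structure_not_conflict struct homology → Spec_is_structure_not_conflict struct homology (is_structure_not_conflict struct homology)

-- ===== LEMMAS AND PROOFS =====

-- proof-side normal form: the matched-pair list produced by a plain stack scan
def altPairs : List (Int × Char) → List Int → List (Int × Int) → List (Int × Int)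
  | [], _, pairs => pairs
  | (pos, c) :: rest, stack, pairs =>
    if c = '(' then altPairs rest (pos :: stack) pairs
    else if c = ')' then
      match stack with
      | s :: ss => altPairs rest ss (pairs ++ [(s, pos)])
      | [] => altPairs rest stack pairs
    else altPairs rest stack pairs

-- one-step unfolding lemmas (full simp decides the character-literal tests)
theorem altPairs_open (pos : Int) (rest : List (Int × Char)) (stack : List Int) (pr : List (Int × Int)) :
    altPairs ((pos, '(') :: rest) stack pr = altPairs rest (pos :: stack) pr := by simp [altPairs]
theorem altPairs_close_cons (pos s : Int) (rest : List (Int × Char)) (ss : List Int) (pr : List (Int × Int)) :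
    altPairs ((pos, ')') :: rest) (s :: ss) pr = altPairs rest ss (pr ++ [(s, pos)]) := by simp [altPairs]
theorem altPairs_close_nil (pos : Int) (rest : List (Int × Char)) (pr : List (Int × Int)) :
    altPairs ((pos, ')') :: rest) [] pr = altPairs rest [] pr := by simp [altPairs]
theorem altPairs_other {c : Char} (h1 : c ≠ '(') (h2 : c ≠ ')') (pos : Int) (rest : List (Int × Char)) (stack : List Int) (pr : List (Int × Int)) :
    altPairs ((pos, c) :: rest) stack pr = altPairs rest stack pr := by simp [altPairs, h1, h2]

theorem altPairs_acc (l : List (Int × Char)) (stack : List Int) (pr : List (Int × Int)) :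
    altPairs l stack pr = pr ++ altPairs l stack [] := by
  induction l generalizing stack pr with
  | nil => simp [altPairs]
  | cons pc rest ih =>
    obtain ⟨pos, c⟩ := pc
    by_cases h1 : c = '('
    · subst h1; rw [altPairs_open, altPairs_open]; exact ih _ _
    · by_cases h2 : c = ')'
      · subst h2
        cases stack with
        | nil => rw [altPairs_close_nil, altPairs_close_nil]; exact ih _ _
        | cons s ss =>
          rw [altPairs_close_cons, altPairs_close_cons,
            ih ss (pr ++ [(s, pos)]), ih ss ([] ++ [(s, pos)])]
          simp
      · rw [altPairs_other h1 h2, altPairs_other h1 h2]; exact ih _ _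

theorem pairs_agree (l : List (Int × Char)) (op cl : List Int) (pr : List (Int × Int)) (inv : List Int) :
    (gcfLoop l op cl pr inv).1 = altPairs l op pr := by
  induction l generalizing op cl pr inv with
  | nil => simp [gcfLoop, altPairs]
  | cons pc rest ih =>
    obtain ⟨pos, c⟩ := pc
    by_cases h1 : c = '('
    · simp [gcfLoop, altPairs, h1, ih]
    · by_cases h2 : c = ')'
      · cases op with
        | nil => simp [gcfLoop, altPairs, h2, ih]
        | cons o os => simp [gcfLoop, altPairs, h2, ih]
      · by_cases h3 : c = 'x' ∨ c = '.'
        · simp [gcfLoop, altPairs, h1, h2, h3, ih]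
        · simp [gcfLoop, altPairs, h1, h2, h3, ih]

theorem altPairs_length (l : List (Int × Char)) (stack : List Int) (pr : List (Int × Int)) :
    (altPairs l stack pr).length = pr.length + pvMatchedPairs (l.map Prod.snd) stack.length := by
  induction l generalizing stack pr with
  | nil => simp [altPairs, pvMatchedPairs]
  | cons pc rest ih =>
    obtain ⟨pos, c⟩ := pc
    by_cases h1 : c = '('
    · simp [altPairs, pvMatchedPairs, h1, ih]
    · by_cases h2 : c = ')'
      · cases stack with
        | nil => simp [altPairs, pvMatchedPairs, h2, ih]
        | cons s ss => simp [altPairs, pvMatchedPairs, h2, ih]; omega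
      · simp [altPairs, pvMatchedPairs, h1, h2, ih]

theorem pairs_count (struct : String) :
    (altPairs (PySem.List.enumerate struct.toList) [] []).length = pvMatchedPairs struct.toList 0 := by
  have := altPairs_length (PySem.List.enumerate struct.toList) [] []
  rw [PySem.List.map_snd_enumerate] at this
  simpa using this

-- wrap of A's final 'if bad_contigs: … return'
def wrapA (b : List ((Int × Int) × (Int × Int))) : Bool × (Option (List ((Int × Int) × (Int × Int)))) :=
  if b ≠ [] then (false, some b) else (true, none)

-- one-step unfolding lemmas for bLoop and aLoop
theorem bLoop_open (hom pos : Int) (rest : List (Int × Char)) (stack : List Int) (run : Option ((Int × Int) × (Int × Int) × Int)) (bad : List ((Int × Int) × (Int × Int))) :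
    bLoop hom ((pos, '(') :: rest) stack run bad = bLoop hom rest (pos :: stack) run bad := by
  simp [bLoop]
theorem bLoop_close_nil (hom pos : Int) (rest : List (Int × Char)) (run : Option ((Int × Int) × (Int × Int) × Int)) (bad : List ((Int × Int) × (Int × Int))) :
    bLoop hom ((pos, ')') :: rest) [] run bad = bLoop hom rest [] run bad := by
  simp [bLoop]
theorem bLoop_close_none (hom pos s : Int) (rest : List (Int × Char)) (ss : List Int) (bad : List ((Int × Int) × (Int × Int))) :
    bLoop hom ((pos, ')') :: rest) (s :: ss) none bad
      = bLoop hom rest ss (some ((s, pos), (s, pos), 1)) bad := by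
  simp [bLoop]
theorem bLoop_close_some (hom pos s : Int) (rest : List (Int × Char)) (ss : List Int) (f i : Int × Int) (n : Int) (bad : List ((Int × Int) × (Int × Int))) :
    bLoop hom ((pos, ')') :: rest) (s :: ss) (some (f, i, n)) bad
      = if s ≥ i.1 - 1 ∧ pos ≤ i.2 + 1 then bLoop hom rest ss (some (f, (s, pos), n + 1)) bad
        else bLoop hom rest ss (some ((s, pos), (s, pos), 1))
          (if n ≥ hom then bad ++ [((i.1, f.1), (f.2, i.2))] else bad) := by
  simp [bLoop]
theorem bLoop_other (hom : Int) {c : Char} (h1 : c ≠ '(') (h2 : c ≠ ')') (pos : Int) (rest : List (Int × Char)) (stack : List Int) (run : Option ((Int × Int) × (Int × Int) × Int)) (bad : List ((Int × Int) × (Int × Int))) :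
    bLoop hom ((pos, c) :: rest) stack run bad = bLoop hom rest stack run bad := by
  simp [bLoop, h1, h2]

theorem aLoop_cons_true (hom : Int) (bad : List ((Int × Int) × (Int × Int))) (n : Int) (s i p : Int × Int) (e : Option (Int × Int)) (ps : List (Int × Int)) (h : is_contiguous i p = true) :
    aLoop hom bad n s i e (p :: ps) = aLoop hom bad (n + 1) s p (some p) ps := by
  simp [aLoop, h]
theorem aLoop_cons_false (hom : Int) (bad : List ((Int × Int) × (Int × Int))) (n : Int) (s i p : Int × Int) (e : Option (Int × Int)) (ps : List (Int × Int)) (h : is_contiguous i p = false) :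
    aLoop hom bad n s i e (p :: ps)
      = aLoop hom (if n ≥ hom then bad ++ [((i.1, s.1), (s.2, i.2))] else bad) 1 p p (some p) ps := by
  simp [aLoop, h]

theorem contig_iff (i p : Int × Int) :
    is_contiguous i p = true ↔ (p.1 ≥ i.1 - 1 ∧ p.2 ≤ i.2 + 1) := by
  simp [is_contiguous]; constructor <;> (intro h; omega)

-- B's streaming loop with a live run computes A's while-loop over the pairs still to come
theorem bLoop_run (hom : Int) (l : List (Int × Char)) (stack : List Int)
    (f i : Int × Int) (n : Int) (bad : List ((Int × Int) × (Int × Int))) :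
    bLoop hom l stack (some (f, i, n)) bad =
      wrapA (aLoop hom bad n f i (some i) (altPairs l stack [])) := by
  induction l generalizing stack f i n bad with
  | nil => simp [bLoop, altPairs, aLoop, wrapA]
  | cons pc rest ih =>
    obtain ⟨pos, c⟩ := pc
    by_cases h1 : c = '('
    · subst h1; rw [bLoop_open, altPairs_open]; exact ih _ _ _ _ _
    · by_cases h2 : c = ')'
      · subst h2
        cases stack with
        | nil => rw [bLoop_close_nil, altPairs_close_nil]; exact ih _ _ _ _ _
        | cons s ss =>
          rw [bLoop_close_some, altPairs_close_cons, altPairs_acc rest ss ([] ++ [(s, pos)])]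
          simp only [List.nil_append, List.singleton_append]
          by_cases hc : s ≥ i.1 - 1 ∧ pos ≤ i.2 + 1
          · rw [if_pos hc, ih,
              aLoop_cons_true hom bad n f i _ (some i) _ ((contig_iff i (s, pos)).mpr hc)]
          · have hf : is_contiguous i (s, pos) = false :=
              Bool.eq_false_iff.mpr (fun h => hc ((contig_iff i (s, pos)).mp h))
            rw [if_neg hc, ih,
              aLoop_cons_false hom bad n f i _ (some i) _ hf]
      · rw [bLoop_other hom h1 h2, altPairs_other h1 h2]; exact ih _ _ _ _ _

-- B with no run yet computes A applied to the pairs still to come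
theorem bLoop_none (hom : Int) (l : List (Int × Char)) (stack : List Int) :
    bLoop hom l stack none [] =
      (match altPairs l stack [] with
       | [] => (true, none)
       | p :: rest => wrapA (aLoop hom [] 1 p p (some p) rest)) := by
  induction l generalizing stack with
  | nil => simp [bLoop, altPairs]
  | cons pc rest ih =>
    obtain ⟨pos, c⟩ := pc
    by_cases h1 : c = '('
    · subst h1; rw [bLoop_open, altPairs_open]; exact ih _
    · by_cases h2 : c = ')'
      · subst h2
        cases stack with
        | nil => rw [bLoop_close_nil, altPairs_close_nil]; exact ih _
        | cons s ss =>
          rw [bLoop_close_none, altPairs_close_cons, altPairs_acc rest ss ([] ++ [(s, pos)])]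
          simp only [List.nil_append, List.singleton_append]
          exact bLoop_run hom rest ss (s, pos) (s, pos) 1 []
      · rw [bLoop_other hom h1 h2, altPairs_other h1 h2]; exact ih _

theorem aLoop_endv (hom : Int) (bad : List ((Int × Int) × (Int × Int))) (st : Int)
    (s i : Int × Int) (e e' : Option (Int × Int)) (p : Int × Int) (ps : List (Int × Int)) :
    aLoop hom bad st s i e (p :: ps) = aLoop hom bad st s i e' (p :: ps) := by
  simp [aLoop]

-- ===== VERDICT (by name: the statement is the Claim_ definition above) =====
theorem is_structure_not_conflict_spec : Claim_equal_is_structure_not_conflict := by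
  intro struct hom _ hpre
  unfold Spec_is_structure_not_conflict
  unfold is_structure_not_conflict is_structure_not_conflict_alt get_computable_form
  rw [pairs_agree, bLoop_none]
  cases hps : altPairs (PySem.List.enumerate struct.toList) [] [] with
  | nil => simp
  | cons p0 rest =>
    cases rest with
    | nil =>
      have hcnt : pvMatchedPairs struct.toList 0 = 1 := by
        have := pairs_count struct; rw [hps] at this; simpa using this.symm
      have hhom : ¬ (1 : Int) ≥ hom := by
        unfold Pre_is_structure_not_conflict at hpre
        intro h; exact hpre ⟨hcnt, by omega⟩
      simp [aLoop, wrapA, hhom]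
    | cons q qs =>
      have h := aLoop_endv hom [] 1 p0 p0 none (some p0) q qs
      simp [wrapA, h]
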